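-- pv_equiv track=rewrite | github.com/ChrisTorng/music-player | scripts/gen_visuals.py | choose_n_fft
-- ===== SOURCE A (Python) =====
-- def choose_n_fft(n_samples: int) -> int:
--     if n_samples <= 0:
--         return 1024
--     preferred = 4096
--     n_fft = 1024
--     while n_fft * 2 <= n_samples and n_fft < preferred:
--         n_fft *= 2
--     return min(n_fft, n_samples)
-- ===== SOURCE B (Python) =====
-- def choose_n_fft(n_samples: int) -> int:
--     if n_samples <= 0:
--         return 1024
--     if n_samples >= 4096:
--         return 4096
--     if n_samples >= 2048:
--         return 2048
--     return min(1024, n_samples)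
-- ===== Notes on version B (the rewrite author's own statement) =====
-- stated objective: simpler
-- what changed: Replaced the doubling while-loop plus final min with a direct threshold if-chain computing the window size in closed form.
import Mathlib
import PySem

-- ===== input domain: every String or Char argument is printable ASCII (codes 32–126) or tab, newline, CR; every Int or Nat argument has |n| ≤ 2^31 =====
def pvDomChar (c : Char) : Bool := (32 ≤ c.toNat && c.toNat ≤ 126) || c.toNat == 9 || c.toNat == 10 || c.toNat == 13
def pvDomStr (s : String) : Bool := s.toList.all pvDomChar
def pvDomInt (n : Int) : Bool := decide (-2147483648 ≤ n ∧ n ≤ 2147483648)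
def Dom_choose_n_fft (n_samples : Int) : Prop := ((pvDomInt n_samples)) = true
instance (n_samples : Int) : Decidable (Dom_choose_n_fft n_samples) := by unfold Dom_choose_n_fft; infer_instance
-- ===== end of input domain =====

-- B replaces A's doubling while-loop (objective: simpler, a closed-form threshold chain); same value on all inputs.

-- ===== PORT A =====
-- A's while loop: 'while n_fft * 2 <= n_samples and n_fft < preferred: n_fft *= 2'.
-- The extra '0 < n_fft' conjunct only makes the recursion total; every reachable call has n_fft ≥ 1024, where it is true.
def chooseLoop (n_samples n_fft : Int) : Int :=
  if h : n_fft * 2 ≤ n_samples ∧ n_fft < 4096 ∧ 0 < n_fft then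
    chooseLoop n_samples (n_fft * 2)
  else n_fft
termination_by (4096 - n_fft).toNat
decreasing_by omega

def choose_n_fft (n_samples : Int) : Int :=
  if n_samples ≤ 0 then 1024
  else min (chooseLoop n_samples 1024) n_samples

-- ===== PORT B =====
def choose_n_fft_alt (n_samples : Int) : Int :=
  if n_samples ≤ 0 then 1024
  else if n_samples ≥ 4096 then 4096
  else if n_samples ≥ 2048 then 2048
  else min 1024 n_samples

-- ===== PRECONDITION & SPEC =====
def Spec_choose_n_fft (n_samples : Int) (out : Int) : Prop := out = choose_n_fft_alt n_samples
instance (n_samples : Int) (out : Int) : Decidable (Spec_choose_n_fft n_samples out) := by unfold Spec_choose_n_fft; infer_instance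

-- ===== CLAIM (what is proved, stated in full; the proofs are below) =====
def Claim_equal_choose_n_fft : Prop := ∀ (n_samples : Int), Dom_choose_n_fft n_samples → Spec_choose_n_fft n_samples (choose_n_fft n_samples)

-- ===== LEMMAS AND PROOFS =====
theorem chooseLoop_4096 (n : Int) : chooseLoop n 4096 = 4096 := by
  rw [chooseLoop]; simp

theorem chooseLoop_2048 (n : Int) :
    chooseLoop n 2048 = if 4096 ≤ n then 4096 else 2048 := by
  rw [chooseLoop]
  split_ifs with h1 h2
  · rw [show (2048:Int)*2 = 4096 by norm_num, chooseLoop_4096]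
  · exact absurd h1.1 h2
  · omega
  · rfl

theorem chooseLoop_1024 (n : Int) :
    chooseLoop n 1024 = if 4096 ≤ n then 4096 else if 2048 ≤ n then 2048 else 1024 := by
  rw [chooseLoop]
  split_ifs with h1 h2 h3
  · rw [show (1024:Int)*2 = 2048 by norm_num, chooseLoop_2048, if_pos h2]
  · rw [show (1024:Int)*2 = 2048 by norm_num, chooseLoop_2048, if_neg h2]
  · exact absurd (by omega : (2048:Int) ≤ n) h3
  · omega
  · omega
  · rfl

-- ===== VERDICT (by name: the statement is the Claim_ definition above) =====
theorem choose_n_fft_spec : Claim_equal_choose_n_fft := by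
  intro n _
  unfold Spec_choose_n_fft choose_n_fft choose_n_fft_alt
  rw [chooseLoop_1024]
  split_ifs <;> simp only [min_def] <;> split_ifs <;> omega
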